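-- pv_equiv track=rewrite | github.com/mihailuoih/AI_360_project | AgentBasedModel/states/states.py | _require_consecutive
-- ===== SOURCE A (Python) =====
-- def _require_consecutive(flags: list, consec: int) -> list:
--     if consec <= 1:
--         return flags
--     streak = 0
--     res = []
--     for flag in flags:
--         streak = streak + 1 if flag else 0
--         res.append(streak >= consec)
--     return res
-- ===== SOURCE B (Python) =====
-- def _require_consecutive(flags: list, consec: int) -> list:
--     if consec <= 1:
--         return flags
--     res = []
--     i, n = 0, len(flags)
--     while i < n:
--         j = i
--         while j < n and bool(flags[j]) == bool(flags[i]):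
--             j += 1
--         L = j - i
--         if flags[i] and L >= consec:
--             res += [False] * (consec - 1) + [True] * (L - consec + 1)
--         else:
--             res += [False] * L
--         i = j
--     return res
-- ===== Notes on version B (the rewrite author's own statement) =====
-- stated objective: alternative
-- what changed: Replaces the per-element streak counter with a run-length decomposition: flags are split into maximal runs of equal truthiness and each run's output segment is emitted wholesale ((consec-1) Falses then (L-consec+1) Trues for a long truthy run, all Falses otherwise).
import Mathlib
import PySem

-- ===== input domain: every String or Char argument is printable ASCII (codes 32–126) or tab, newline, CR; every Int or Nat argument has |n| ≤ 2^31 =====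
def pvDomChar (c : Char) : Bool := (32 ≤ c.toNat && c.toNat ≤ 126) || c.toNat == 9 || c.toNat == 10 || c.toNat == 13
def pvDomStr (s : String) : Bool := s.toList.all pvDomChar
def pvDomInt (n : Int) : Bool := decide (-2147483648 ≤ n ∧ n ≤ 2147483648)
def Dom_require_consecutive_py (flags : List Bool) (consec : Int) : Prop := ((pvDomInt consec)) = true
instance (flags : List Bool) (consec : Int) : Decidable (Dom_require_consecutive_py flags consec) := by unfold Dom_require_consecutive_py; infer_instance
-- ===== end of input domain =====

-- B replaces A's per-element streak counter with a run-length decomposition (same O(n) cost): objective 'alternative'.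

-- ===== PORT A =====
-- A: streak accumulator folded over the flags, appending (streak >= consec) per element.
def require_consecutive_py (flags : List Bool) (consec : Int) : List Bool :=
  if consec ≤ 1 then flags
  else
    (flags.foldl (fun (st : Int × List Bool) flag =>
      let streak : Int := if flag then st.1 + 1 else 0
      (streak, st.2 ++ [decide (streak ≥ consec)])) ((0 : Int), ([] : List Bool))).2

-- ===== PORT B =====
-- B: split into maximal runs of equal truthiness; emit each run's output segment wholesale.
def goB (c : Int) : List Bool → List Bool
  | [] => []
  | f :: rest =>
      let run := (f :: rest).takeWhile (· == f)
      let tail := rest.dropWhile (· == f)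
      let L : Int := run.length
      (if f && decide (L ≥ c) then
         List.replicate (c - 1).toNat false ++ List.replicate (L - c + 1).toNat true
       else List.replicate L.toNat false) ++ goB c tail
termination_by xs => xs.length
decreasing_by
  simpa using Nat.lt_succ_of_le (List.length_dropWhile_le _ rest)

def require_consecutive_py_alt (flags : List Bool) (consec : Int) : List Bool :=
  if consec ≤ 1 then flags else goB consec flags

-- ===== PRECONDITION & SPEC =====
def Spec_require_consecutive_py (flags : List Bool) (consec : Int) (out : List Bool) : Prop := out = require_consecutive_py_alt flags consec
instance (flags : List Bool) (consec : Int) (out : List Bool) : Decidable (Spec_require_consecutive_py flags consec out) := by unfold Spec_require_consecutive_py; infer_instance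

-- ===== CLAIM (what is proved, stated in full; the proofs are below) =====
def Claim_equal_require_consecutive_py : Prop := ∀ (flags : List Bool) (consec : Int), Dom_require_consecutive_py flags consec → Spec_require_consecutive_py flags consec (require_consecutive_py flags consec)

-- ===== LEMMAS AND PROOFS =====

-- Recursive form of A's fold.
def goA (c s : Int) : List Bool → List Bool
  | [] => []
  | f :: rest =>
      let st : Int := if f then s + 1 else 0
      decide (st ≥ c) :: goA c st rest

lemma foldl_goA (c : Int) : ∀ (xs : List Bool) (s : Int) (acc : List Bool),
    (xs.foldl (fun (st : Int × List Bool) flag =>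
      let streak : Int := if flag then st.1 + 1 else 0
      (streak, st.2 ++ [decide (streak ≥ c)])) (s, acc)).2 = acc ++ goA c s xs := by
  intro xs
  induction xs with
  | nil => intro s acc; simp [goA]
  | cons f rest ih => intro s acc; simp [List.foldl, goA, ih]

-- the per-position outputs of a run of trues entered with streak s
def seg (c s : Int) : Nat → List Bool
  | 0 => []
  | n + 1 => decide (s + 1 ≥ c) :: seg c (s + 1) n

lemma goA_trueRun (c : Int) : ∀ (n : Nat) (s : Int) (t : List Bool),
    goA c s (List.replicate n true ++ t) = seg c s n ++ goA c (s + n) t := by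
  intro n
  induction n with
  | zero => intro s t; simp [seg]
  | succ m ih =>
      intro s t
      simp only [List.replicate_succ, List.cons_append, goA, seg, if_true]
      rw [ih, show (s + 1 + (m : Int)) = s + ((m + 1 : Nat) : Int) by push_cast; ring]

lemma goA_falseRun (c : Int) (hc : 2 ≤ c) : ∀ (n : Nat) (t : List Bool) (s : Int),
    goA c s (List.replicate (n + 1) false ++ t)
      = List.replicate (n + 1) false ++ goA c 0 t := by
  intro n
  induction n with
  | zero =>
      intro t s
      simp [goA, decide_eq_false (by omega : ¬ ((0:Int) ≥ c))]
  | succ m ih =>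
      intro t s
      rw [show m + 1 + 1 = (m + 1) + 1 from rfl, List.replicate_succ, List.cons_append]
      simp only [goA, if_false, Bool.false_eq_true]
      rw [ih]
      simp [List.replicate_succ, decide_eq_false (by omega : ¬ ((0:Int) ≥ c))]

lemma goA_reset (c : Int) (hc : 2 ≤ c) (t : List Bool)
    (ht : t = [] ∨ ∃ r, t = false :: r) (s : Int) : goA c s t = goA c 0 t := by
  rcases ht with h | ⟨r, h⟩ <;> subst h
  · rfl
  · simp [goA]

lemma seg_high (c : Int) : ∀ (n : Nat) (s : Int), c ≤ s + 1 →
    seg c s n = List.replicate n true := by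
  intro n
  induction n with
  | zero => intro s _; rfl
  | succ m ih =>
      intro s hs
      simp only [seg, List.replicate_succ]
      rw [ih (s + 1) (by omega)]
      simp [decide_eq_true (by omega : (s + 1 : Int) ≥ c)]

lemma seg_general (c : Int) (hc : 2 ≤ c) : ∀ (n : Nat) (s : Int), 0 ≤ s → s ≤ c - 1 →
    seg c s n = List.replicate (min n (c - 1 - s).toNat) false
      ++ List.replicate (n - (c - 1 - s).toNat) true := by
  intro n
  induction n with
  | zero => intro s _ _; simp [seg]
  | succ m ih =>
      intro s hs0 hs1
      by_cases h : s = c - 1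
      · subst h
        simp only [seg]
        rw [seg_high c m _ (by omega)]
        simp [decide_eq_true (by omega : (c - 1 + 1 : Int) ≥ c), List.replicate_succ]
      · have hlt : s < c - 1 := lt_of_le_of_ne hs1 h
        simp only [seg]
        rw [ih (s + 1) (by omega) (by omega)]
        have hm : (c - 1 - s).toNat = (c - 1 - (s + 1)).toNat + 1 := by omega
        have h1 : min (m + 1) ((c - 1 - s).toNat) = min m ((c - 1 - (s + 1)).toNat) + 1 := by
          omega
        have h2 : (m + 1) - (c - 1 - s).toNat = m - (c - 1 - (s + 1)).toNat := by omega
        rw [h1, h2, List.replicate_succ]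
        simp [decide_eq_false (by omega : ¬ ((s + 1 : Int) ≥ c))]

lemma seg_zero (c : Int) (hc : 2 ≤ c) (n : Nat) :
    seg c 0 n = if ((n : Int) ≥ c) then
        List.replicate (c - 1).toNat false ++ List.replicate ((n : Int) - c + 1).toNat true
      else List.replicate n false := by
  rw [seg_general c hc n 0 le_rfl (by omega)]
  by_cases h : (n : Int) ≥ c
  · rw [if_pos h]
    have h1 : min n (c - 1 - 0).toNat = (c - 1).toNat := by omega
    have h2 : n - (c - 1 - 0).toNat = ((n : Int) - c + 1).toNat := by omega
    rw [h1, h2]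
  · rw [if_neg h]
    have h1 : min n (c - 1 - 0).toNat = n := by omega
    have h2 : n - (c - 1 - 0).toNat = 0 := by omega
    rw [h1, h2]
    simp

lemma takeWhile_beq_replicate (b : Bool) (l : List Bool) :
    l.takeWhile (· == b) = List.replicate (l.takeWhile (· == b)).length b := by
  apply List.eq_replicate_of_mem
  intro x hx
  have := List.mem_takeWhile_imp hx
  simpa using this

lemma dropWhile_shape (p : Bool → Bool) : ∀ (l : List Bool),
    l.dropWhile p = [] ∨ ∃ y r, l.dropWhile p = y :: r ∧ p y = false := by
  intro l
  induction l with
  | nil => left; rfl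
  | cons x xs ih =>
      by_cases h : p x
      · simpa [List.dropWhile, h] using ih
      · right; exact ⟨x, xs, by simp [List.dropWhile, h], by simp [h]⟩

theorem goA_eq_goB (c : Int) (hc : 2 ≤ c) : (xs : List Bool) → goA c 0 xs = goB c xs
  | [] => by simp [goA, goB]
  | f :: rest => by
      have hrec := goA_eq_goB c hc (rest.dropWhile (· == f))
      set k := (rest.takeWhile (· == f)).length with hk
      have htw : rest.takeWhile (· == f) = List.replicate k f := takeWhile_beq_replicate f rest
      have hdecomp : f :: rest = List.replicate (k + 1) f ++ rest.dropWhile (· == f) := by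
        conv_lhs => rw [← List.takeWhile_append_dropWhile (p := (· == f)) (l := rest)]
        rw [htw, List.replicate_succ]
        rfl
      have hrun : (f :: rest).takeWhile (· == f) = f :: rest.takeWhile (· == f) := by
        simp [List.takeWhile]
      rw [goB, hrun, htw]
      cases f with
      | false =>
          rw [hdecomp, goA_falseRun c hc k _ 0, hrec]
          simp
      | true =>
          have hshape := dropWhile_shape (· == true) rest
          have htail : rest.dropWhile (· == true) = [] ∨
              ∃ r, rest.dropWhile (· == true) = false :: r := by
            rcases hshape with h | ⟨y, r, h, hy⟩
            · exact Or.inl h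
            · right; refine ⟨r, ?_⟩
              cases y with
              | false => exact h
              | true => simp at hy
          rw [hdecomp, goA_trueRun c (k + 1) 0 _, goA_reset c hc _ htail, hrec,
            seg_zero c hc (k + 1)]
          simp only [List.length_cons, List.length_replicate]
          congr 1
          by_cases h : ((k + 1 : Nat) : Int) ≥ c
          · simp [h]
          · simp [h]
termination_by xs => xs.length
decreasing_by simpa using Nat.lt_succ_of_le (List.length_dropWhile_le _ rest)

-- ===== VERDICT (by name: the statement is the Claim_ definition above) =====
theorem require_consecutive_py_spec : Claim_equal_require_consecutive_py := by
  intro flags consec _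
  unfold Spec_require_consecutive_py require_consecutive_py require_consecutive_py_alt
  by_cases h : consec ≤ 1
  · simp [h]
  · rw [if_neg h, if_neg h, foldl_goA consec flags 0 [], List.nil_append,
      goA_eq_goB consec (by omega) flags]
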